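-- pv_equiv track=rewrite | github.com/mozman/ezdxf | src/ezdxf/_acis/io.py | parse_header_str
-- ===== SOURCE A (Python) =====
-- from typing import List, Tuple, Union, Sequence, Iterator, Any, Dict
--
-- def parse_header_str(s: str) -> Iterator[str]:
--     num = ""
--     collect = 0
--     token = ""
--     for c in s.rstrip():
--         if collect > 0:
--             token += c
--             collect -= 1
--             if collect == 0:
--                 yield token
--                 token = ""
--         elif c == "@":
--             continue
--         elif c in "0123456789":
--             num += c
--         elif c == " " and num:
--             collect = int(num)
--             num = ""
-- ===== SOURCE B (Python) =====
-- def parse_header_str(s):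
--     t = s.rstrip()
--     out = []
--     num = ""
--     i = 0
--     n = len(t)
--     while i < n:
--         c = t[i]
--         if c == "@":
--             i += 1
--         elif c in "0123456789":
--             num += c
--             i += 1
--         elif c == " " and num:
--             length = int(num)
--             num = ""
--             tok = t[i + 1 : i + 1 + length]
--             if 0 < length == len(tok):
--                 out.append(tok)
--             i += 1 + length
--         else:
--             i += 1
--     return out
-- ===== Notes on version B (the rewrite author's own statement) =====
-- stated objective: simpler
-- what changed: Replaced A's three-piece generator state (collect countdown + char-by-char token accumulation) with an index-based scanner that reads each announced token in one slice and jumps the index past it, yielding only complete tokens.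
import Mathlib
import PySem

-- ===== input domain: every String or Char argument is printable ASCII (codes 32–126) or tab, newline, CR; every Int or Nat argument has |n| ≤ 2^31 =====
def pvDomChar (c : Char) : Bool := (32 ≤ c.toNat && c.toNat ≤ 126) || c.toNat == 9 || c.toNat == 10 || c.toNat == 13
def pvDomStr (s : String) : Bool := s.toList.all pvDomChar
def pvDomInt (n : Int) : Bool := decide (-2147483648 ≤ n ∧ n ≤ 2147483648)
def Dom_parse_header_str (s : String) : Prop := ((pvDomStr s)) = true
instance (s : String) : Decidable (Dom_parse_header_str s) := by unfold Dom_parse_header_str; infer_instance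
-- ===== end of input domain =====

-- B replaces A's collect-countdown/token-accumulation generator state with an index scanner
-- that takes each announced token as one slice and jumps past it (objective: simpler).

-- ===== PORT A =====
-- state: num (digit accumulator), collect (remaining chars of current token), token (chars
-- collected so far); one step per character, exactly A's branch order.
-- 'c in "0123456789"' on a single char is list membership; int(num) is ported as
-- (PySem.Int.ofChars? num).getD 0 — exact here because A only reaches it with num a
-- nonempty string of digits, on which int() cannot raise.
def parseAgo : List Char → List Char → Int → List Char → List String
  | [], _, _, _ => []
  | c :: cs, num, collect, token =>
    if collect > 0 then
      let token' := token ++ [c]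
      let collect' := collect - 1
      if collect' = 0 then String.mk token' :: parseAgo cs num collect' []
      else parseAgo cs num collect' token'
    else if c = '@' then parseAgo cs num collect token
    else if c ∈ "0123456789".toList then parseAgo cs (num ++ [c]) collect token
    else if c = ' ' ∧ num ≠ [] then parseAgo cs [] ((PySem.Int.ofChars? num).getD 0) token
    else parseAgo cs num collect token

def parse_header_str (s : String) : List String :=
  parseAgo (PySem.Chars.rstrip s.toList) [] 0 []

-- ===== PORT B =====
-- index scanner over the same rstripped char list: on ' ' with num set, take the token as one
-- slice t[i+1 : i+1+length] and jump i past it; append the token only if it is complete.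
def parseBgo (t : List Char) (i : Nat) (num : List Char) : List String :=
  if h : i < t.length then
    let c := t[i]
    if c = '@' then parseBgo t (i + 1) num
    else if c ∈ "0123456789".toList then parseBgo t (i + 1) (num ++ [c])
    else if c = ' ' ∧ num ≠ [] then
      let len := ((PySem.Int.ofChars? num).getD 0).toNat
      let tok := PySem.List.slice t (some ((i : Int) + 1)) (some ((i : Int) + 1 + len))
      (if 0 < len ∧ tok.length = len then [String.mk tok] else []) ++ parseBgo t (i + 1 + len) []
    else parseBgo t (i + 1) num
  else []
termination_by t.length - i
decreasing_by all_goals omega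

def parse_header_str_alt (s : String) : List String :=
  parseBgo (PySem.Chars.rstrip s.toList) 0 []

-- ===== PRECONDITION & SPEC =====
def Spec_parse_header_str (s : String) (out : List String) : Prop := out = parse_header_str_alt s
instance (s : String) (out : List String) : Decidable (Spec_parse_header_str s out) := by unfold Spec_parse_header_str; infer_instance

-- ===== CLAIM (what is proved, stated in full; the proofs are below) =====
def Claim_equal_parse_header_str : Prop := ∀ (s : String), Dom_parse_header_str s → Spec_parse_header_str s (parse_header_str s)

-- ===== LEMMAS AND PROOFS =====

-- B's recursion re-expressed over the suffix t.drop i (proof helper).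
def parseBsuf : List Char → List Char → List String
  | [], _ => []
  | c :: cs, num =>
    if c = '@' then parseBsuf cs num
    else if c ∈ "0123456789".toList then parseBsuf cs (num ++ [c])
    else if c = ' ' ∧ num ≠ [] then
      let len := ((PySem.Int.ofChars? num).getD 0).toNat
      let tok := cs.take len
      (if 0 < len ∧ tok.length = len then [String.mk tok] else []) ++ parseBsuf (cs.drop len) []
    else parseBsuf cs num
termination_by cs _ => cs.length
decreasing_by all_goals (simp only [List.length_cons, List.length_drop]; omega)

theorem parseAgo_collect (cs : List Char) : ∀ (num tok : List Char) (k : Int), 0 < k →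
    parseAgo cs num k tok =
      if k ≤ (cs.length : Int) then
        String.mk (tok ++ cs.take k.toNat) :: parseAgo (cs.drop k.toNat) num 0 []
      else [] := by
  induction cs with
  | nil =>
    intro num tok k hk
    simp only [parseAgo, List.length_nil, Nat.cast_zero]
    rw [if_neg (by omega)]
  | cons c cs ih =>
    intro num tok k hk
    by_cases h1 : k = 1
    · subst h1
      simp [parseAgo]
    · have hk1 : 0 < k - 1 := by omega
      have hkt : k.toNat = (k - 1).toNat + 1 := by omega
      rw [show parseAgo (c :: cs) num k tok
            = parseAgo cs num (k - 1) (tok ++ [c]) by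
            simp only [parseAgo]
            rw [if_pos hk, if_neg (show ¬(k - 1 = 0) by omega)]]
      rw [ih num (tok ++ [c]) (k - 1) hk1]
      simp only [hkt, List.take_succ_cons, List.drop_succ_cons, List.length_cons]
      by_cases hle : k - 1 ≤ (cs.length : Int)
      · rw [if_pos hle, if_pos (by push_cast; omega)]
        simp
      · rw [if_neg hle, if_neg (by push_cast; omega)]

theorem parseAgo_nonpos (cs : List Char) : ∀ (num tok : List Char) (k : Int), k ≤ 0 →
    parseAgo cs num k tok = parseAgo cs num 0 tok := by
  induction cs with
  | nil => intro num tok k _; simp [parseAgo]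
  | cons c cs ih =>
    intro num tok k hk
    simp only [parseAgo]
    rw [if_neg (show ¬(k > 0) by omega), if_neg (show ¬((0:Int) > 0) by omega)]
    split_ifs <;> first | rfl | exact ih _ _ k hk

theorem parseBsuf_nil (num : List Char) : parseBsuf [] num = [] := by simp [parseBsuf]

theorem parseAgo_eq_parseBsuf (cs num : List Char) :
    parseAgo cs num 0 [] = parseBsuf cs num := by
  induction cs, num using parseBsuf.induct with
  | case1 num => simp [parseAgo, parseBsuf]
  | case2 cs num ih =>
    simp [parseAgo, parseBsuf, ih]
  | case3 c cs num h1 h2 ih =>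
    simp only [parseAgo, parseBsuf]
    rw [if_neg (show ¬((0:Int) > 0) by omega), if_neg h1, if_neg h1, if_pos h2, if_pos h2]
    exact ih
  | case4 c cs num h1 h2 h3 len ih =>
    simp only [parseBsuf]
    rw [show parseAgo (c :: cs) num 0 []
          = parseAgo cs [] ((PySem.Int.ofChars? num).getD 0) [] by
          simp only [parseAgo]
          rw [if_neg (show ¬((0:Int) > 0) by omega), if_neg h1, if_neg h2, if_pos h3]]
    rw [if_neg h1, if_neg h2, if_pos h3]
    set v : Int := (PySem.Int.ofChars? num).getD 0 with hv
    by_cases hvpos : 0 < v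
    · rw [parseAgo_collect cs [] [] v hvpos]
      by_cases hle : v ≤ (cs.length : Int)
      · rw [if_pos hle]
        rw [if_pos ⟨by omega, by simp only [List.length_take]; omega⟩]
        simp only [List.nil_append, List.singleton_append]
        rw [ih]
      · rw [if_neg hle]
        rw [if_neg (by simp only [List.length_take]; omega)]
        have hd : cs.drop v.toNat = [] := List.drop_eq_nil_of_le (by omega)
        simp [hd, parseBsuf_nil]
    · rw [parseAgo_nonpos cs [] [] v (by omega)]
      have hz : v.toNat = 0 := by omega
      rw [if_neg (by simp [hz])]
      simp only [hz, List.drop_zero, List.nil_append]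
      rw [show len = 0 from hz, List.drop_zero] at ih
      exact ih
  | case5 c cs num h1 h2 h3 ih =>
    simp only [parseAgo, parseBsuf]
    rw [if_neg (show ¬((0:Int) > 0) by omega), if_neg h1, if_neg h1, if_neg h2, if_neg h2,
        if_neg h3, if_neg h3]
    exact ih

theorem parseBgo_eq_parseBsuf (t : List Char) (i : Nat) (num : List Char) :
    parseBgo t i num = parseBsuf (t.drop i) num := by
  induction i, num using parseBgo.induct t with
  | case1 i num h c hc ih =>
    rw [parseBgo, dif_pos h, List.drop_eq_getElem_cons h]
    simp only [parseBsuf]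
    rw [if_pos hc, if_pos hc]
    exact ih
  | case2 i num h c hc hd ih =>
    rw [parseBgo, dif_pos h, List.drop_eq_getElem_cons h]
    simp only [parseBsuf]
    rw [if_neg hc, if_neg hc, if_pos hd, if_pos hd]
    exact ih
  | case3 i num h c hc hd hs len ih =>
    rw [parseBgo, dif_pos h, List.drop_eq_getElem_cons h]
    simp only [parseBsuf]
    rw [if_neg hc, if_neg hc, if_neg (show ¬ t[i] ∈ "0123456789".toList from hd),
        if_neg (show ¬ t[i] ∈ "0123456789".toList from hd), if_pos hs, if_pos hs]
    have hslice : PySem.List.slice t (some ((i : Int) + 1))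
        (some ((i : Int) + 1 + ((PySem.Int.ofChars? num).getD 0).toNat))
        = (t.drop (i + 1)).take ((PySem.Int.ofChars? num).getD 0).toNat := by
      rw [show ((i : Int) + 1) = ((i + 1 : Nat) : Int) by push_cast; ring,
          show ((i + 1 : Nat) : Int) + (((PySem.Int.ofChars? num).getD 0).toNat : Int)
             = ((i + 1 + ((PySem.Int.ofChars? num).getD 0).toNat : Nat) : Int) by push_cast; ring]
      rw [PySem.List.slice_natCast]
      congr 1
      omega
    have hdd : (t.drop (i + 1)).drop ((PySem.Int.ofChars? num).getD 0).toNat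
        = t.drop (i + 1 + ((PySem.Int.ofChars? num).getD 0).toNat) := by
      rw [List.drop_drop]
    rw [hslice, ih, hdd]
  | case4 i num h c hc hd hs ih =>
    rw [parseBgo, dif_pos h, List.drop_eq_getElem_cons h]
    simp only [parseBsuf]
    rw [if_neg hc, if_neg hc, if_neg (show ¬ t[i] ∈ "0123456789".toList from hd),
        if_neg (show ¬ t[i] ∈ "0123456789".toList from hd), if_neg hs, if_neg hs]
    exact ih
  | case5 i num h =>
    have h' : t.length ≤ i := by omega
    simp [parseBgo, h, List.drop_eq_nil_of_le h', parseBsuf_nil]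

-- ===== VERDICT (by name: the statement is the Claim_ definition above) =====
theorem parse_header_str_spec : Claim_equal_parse_header_str := by
  intro s _
  unfold Spec_parse_header_str parse_header_str parse_header_str_alt
  rw [parseBgo_eq_parseBsuf, List.drop_zero, parseAgo_eq_parseBsuf]
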